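-- pv_equiv track=rewrite | github.com/SUJITHVEMUULAPALLI/wjp-analyzer | src/wjp_analyser/analysis/group_manager.py | _group_by_complexity
-- ===== SOURCE A (Python) =====
-- from typing import Dict, List, Optional, Set, Tuple
--
-- def _group_by_complexity(components: List[dict]) -> Dict[str, List[dict]]:
--     """Group components by vertex count complexity."""
--     groups = {'simple': [], 'moderate': [], 'complex': []}
--
--     for comp in components:
--         vertices = comp.get('vertex_count', 0)
--         if vertices <= 8:
--             groups['simple'].append(comp)
--         elif vertices <= 50:
--             groups['moderate'].append(comp)
--         else:
--             groups['complex'].append(comp)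
--
--     return groups
-- ===== SOURCE B (Python) =====
-- from typing import Dict, List
--
--
-- def _group_by_complexity(components: List[dict]) -> Dict[str, List[dict]]:
--     """Group components by vertex count complexity via three independent filter passes."""
--     return {
--         'simple': [c for c in components if c.get('vertex_count', 0) <= 8],
--         'moderate': [c for c in components if 8 < c.get('vertex_count', 0) <= 50],
--         'complex': [c for c in components if c.get('vertex_count', 0) > 50],
--     }
-- ===== Notes on version B (the rewrite author's own statement) =====
-- stated objective: simpler
-- what changed: Replaces the single-pass if/elif/else bucketing into a mutable dict with three independent filter comprehensions, one per complexity band, assembled directly into the result dict; no shared accumulator or branch chain remains.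
import Mathlib
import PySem

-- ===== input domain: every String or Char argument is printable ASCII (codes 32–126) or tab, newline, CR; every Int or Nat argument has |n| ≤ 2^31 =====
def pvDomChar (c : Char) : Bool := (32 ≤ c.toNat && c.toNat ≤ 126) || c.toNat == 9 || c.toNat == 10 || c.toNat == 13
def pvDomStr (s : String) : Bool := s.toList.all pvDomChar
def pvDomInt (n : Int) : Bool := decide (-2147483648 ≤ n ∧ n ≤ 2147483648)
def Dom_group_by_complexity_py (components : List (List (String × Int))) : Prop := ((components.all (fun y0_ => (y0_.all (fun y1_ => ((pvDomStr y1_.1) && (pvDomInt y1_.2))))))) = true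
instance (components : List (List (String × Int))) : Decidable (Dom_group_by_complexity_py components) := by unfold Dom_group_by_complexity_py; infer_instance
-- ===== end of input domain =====

-- B replaces A's single-pass if/elif/else bucketing into a mutable dict with three
-- independent filter passes, one per complexity band (simpler; same O(n) cost).

-- ===== PORT A =====
def group_by_complexity_py (components : List (List (String × Int))) : List (String × List (List (String × Int))) :=
  let groups : PySem.Dict String (List (List (String × Int))) :=
    PySem.Dict.ofList [("simple", []), ("moderate", []), ("complex", [])]
  let groups := components.foldl (fun g comp =>
    let vertices : Int := (PySem.Dict.mk comp).getD "vertex_count" 0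
    if vertices ≤ 8 then
      g.modify "simple" [] (· ++ [comp])
    else if vertices ≤ 50 then
      g.modify "moderate" [] (· ++ [comp])
    else
      g.modify "complex" [] (· ++ [comp])) groups
  groups.items

-- ===== PORT B =====
def group_by_complexity_py_alt (components : List (List (String × Int))) : List (String × List (List (String × Int))) :=
  [("simple", components.filter (fun c => decide ((PySem.Dict.mk c).getD "vertex_count" 0 ≤ 8))),
   ("moderate", components.filter (fun c => decide (8 < (PySem.Dict.mk c).getD "vertex_count" 0 ∧ (PySem.Dict.mk c).getD "vertex_count" 0 ≤ 50))),
   ("complex", components.filter (fun c => decide (50 < (PySem.Dict.mk c).getD "vertex_count" 0)))]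

-- ===== PRECONDITION & SPEC =====
def Spec_group_by_complexity_py (components : List (List (String × Int))) (out : List (String × List (List (String × Int)))) : Prop := out = group_by_complexity_py_alt components
instance (components : List (List (String × Int))) (out : List (String × List (List (String × Int)))) : Decidable (Spec_group_by_complexity_py components out) := by unfold Spec_group_by_complexity_py; infer_instance

-- ===== CLAIM (what is proved, stated in full; the proofs are below) =====
def Claim_equal_group_by_complexity_py : Prop := ∀ (components : List (List (String × Int))), Dom_group_by_complexity_py components → Spec_group_by_complexity_py components (group_by_complexity_py components)

-- ===== LEMMAS AND PROOFS =====

-- A's loop body, named (definitionally equal to the lambda in the port)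
def stepA (g : PySem.Dict String (List (List (String × Int)))) (comp : List (String × Int)) :
    PySem.Dict String (List (List (String × Int))) :=
  let vertices : Int := (PySem.Dict.mk comp).getD "vertex_count" 0
  if vertices ≤ 8 then
    g.modify "simple" [] (· ++ [comp])
  else if vertices ≤ 50 then
    g.modify "moderate" [] (· ++ [comp])
  else
    g.modify "complex" [] (· ++ [comp])

-- loop invariant: A's fold over the 3-key dict, started from accumulators s/m/c,
-- produces those accumulators extended by the three band filters
lemma loop_inv (components : List (List (String × Int)))
    (s m c : List (List (String × Int))) :
    (components.foldl stepA
      (PySem.Dict.mk [("simple", s), ("moderate", m), ("complex", c)])).items =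
    [("simple", s ++ components.filter (fun x => decide ((PySem.Dict.mk x).getD "vertex_count" 0 ≤ 8))),
     ("moderate", m ++ components.filter (fun x => decide (8 < (PySem.Dict.mk x).getD "vertex_count" 0 ∧ (PySem.Dict.mk x).getD "vertex_count" 0 ≤ 50))),
     ("complex", c ++ components.filter (fun x => decide (50 < (PySem.Dict.mk x).getD "vertex_count" 0)))] := by
  induction components generalizing s m c with
  | nil => simp [PySem.Dict.items]
  | cons comp rest ih =>
    rw [List.foldl_cons]
    by_cases h8 : ((PySem.Dict.mk comp).getD "vertex_count" 0 : Int) ≤ 8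
    · have hA : stepA (PySem.Dict.mk [("simple", s), ("moderate", m), ("complex", c)]) comp =
          PySem.Dict.mk [("simple", s ++ [comp]), ("moderate", m), ("complex", c)] := by
        simp only [stepA]; rw [if_pos h8]; rfl
      rw [hA, ih]
      simp [List.filter_cons, h8, (by omega : (PySem.Dict.mk comp).getD "vertex_count" 0 ≤ (50 : Int))]
    · by_cases h50 : ((PySem.Dict.mk comp).getD "vertex_count" 0 : Int) ≤ 50
      · have hA : stepA (PySem.Dict.mk [("simple", s), ("moderate", m), ("complex", c)]) comp =
            PySem.Dict.mk [("simple", s), ("moderate", m ++ [comp]), ("complex", c)] := by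
          simp only [stepA]; rw [if_neg h8, if_pos h50]; rfl
        rw [hA, ih]
        simp [List.filter_cons, h8, h50]
      · have hA : stepA (PySem.Dict.mk [("simple", s), ("moderate", m), ("complex", c)]) comp =
            PySem.Dict.mk [("simple", s), ("moderate", m), ("complex", c ++ [comp])] := by
          simp only [stepA]; rw [if_neg h8, if_neg h50]; rfl
        rw [hA, ih]
        simp [List.filter_cons, h8, h50]

-- ===== VERDICT (by name: the statement is the Claim_ definition above) =====
theorem group_by_complexity_py_spec : Claim_equal_group_by_complexity_py := by
  intro components _
  unfold Spec_group_by_complexity_py group_by_complexity_py group_by_complexity_py_alt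
  exact loop_inv components [] [] []
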